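-- pv_equiv track=rewrite | github.com/bvanaken/explain-BERT-QA | probing-tasks/squad_sup_facts_processor.py | find_sentence_position_in_context
-- ===== SOURCE A (Python) =====
-- from typing import List
--
-- def find_sentence_position_in_context(context: List, sentence_tokens: List) -> int:
--     """
--     Goes through a list of context tokens and tries to find the sentence tokens. If sentence tokens are found, the
--     start index is returned.
--
--     :param context: List of tokens in a context document.
--     :param sentence_tokens: List of tokens in a sentence, that is supposed to be within the context.
--     :return: The start token position of the sentence in the context. If not found returns None.
--     """
--     for token_index, token in enumerate(context):
--         # check if current token equals the first sentence token
--         if token == sentence_tokens[0]: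
--
--             match = True
--             # go through all sentence tokens to see if they match with the following context tokens
--             for i in range(1, len(sentence_tokens)):
--                 if len(context) > token_index + i and context[token_index + i] == sentence_tokens[i]:
--                     continue
--
--                 match = False
--                 break
--             if match:
--                 return token_index
-- ===== SOURCE B (Python) =====
-- from typing import List
--
-- _MOD = 2305843009213693951
-- _BASE = 1000003
--
--
-- def _token_hash(token) -> int:
--     return sum(map(ord, token)) % _MOD
--
--
-- def find_sentence_position_in_context(context: List, sentence_tokens: List) -> int:
--     """Rabin-Karp: roll a window hash over the context and only compare tokens
--     when the window hash equals the sentence hash."""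
--     m = len(sentence_tokens)
--     n = len(context)
--     if m == 0 or n < m:
--         return None
--     hp = 0
--     h = 0
--     for i in range(m):
--         hp = (hp * _BASE + _token_hash(sentence_tokens[i])) % _MOD
--         h = (h * _BASE + _token_hash(context[i])) % _MOD
--     power = pow(_BASE, m - 1, _MOD)
--     for start in range(n - m + 1):
--         if h == hp and context[start:start + m] == sentence_tokens:
--             return start
--         if start + m < n:
--             h = ((h - _token_hash(context[start]) * power) * _BASE
--                  + _token_hash(context[start + m])) % _MOD
--     return None
-- ===== Notes on version B (the rewrite author's own statement) =====
-- stated objective: alternative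
-- what changed: Replaces A's per-position token-by-token comparison with Rabin-Karp: a rolling polynomial window hash (mod 2^61-1) filters candidate start positions and tokens are compared only when the window hash equals the sentence hash.
-- outside the precondition, e.g. on find_sentence_position_in_context([], []): A returns None, B returns None
import Mathlib
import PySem

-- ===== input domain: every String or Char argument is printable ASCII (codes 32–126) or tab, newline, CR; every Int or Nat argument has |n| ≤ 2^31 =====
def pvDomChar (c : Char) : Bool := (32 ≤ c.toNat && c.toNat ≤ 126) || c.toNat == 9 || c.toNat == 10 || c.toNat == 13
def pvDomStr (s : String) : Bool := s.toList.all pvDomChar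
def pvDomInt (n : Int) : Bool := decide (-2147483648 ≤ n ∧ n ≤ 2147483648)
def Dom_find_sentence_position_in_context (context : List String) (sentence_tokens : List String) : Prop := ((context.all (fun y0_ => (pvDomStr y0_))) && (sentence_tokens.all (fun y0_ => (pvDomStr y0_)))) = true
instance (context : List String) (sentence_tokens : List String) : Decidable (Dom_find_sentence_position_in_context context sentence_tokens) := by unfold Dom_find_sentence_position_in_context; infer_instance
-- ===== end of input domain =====

-- B replaces A's position-by-position token comparison by Rabin-Karp: a rolling window hash filters start positions, tokens are compared only on a hash hit.


-- ===== PORT A =====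
-- inner 'for i in range(1, len(sentence_tokens)): … continue / match = False; break'
def pvA_inner (context : List String) (sentence_tokens : List String) (token_index : Int) : List Int → Bool
  | [] => true
  | i :: rest =>
    if (context.length : Int) > token_index + i ∧
        PySem.List.pyGet? context (token_index + i) = PySem.List.pyGet? sentence_tokens i then
      pvA_inner context sentence_tokens token_index rest
    else false

-- outer 'for token_index, token in enumerate(context): …'
def pvA_loop (context : List String) (sentence_tokens : List String) : List (Int × String) → Option Int
  | [] => none
  | (token_index, token) :: rest =>
    if some token = PySem.List.pyGet? sentence_tokens 0 then
      if pvA_inner context sentence_tokens token_index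
          (PySem.List.pyRange 1 sentence_tokens.length 1) then some token_index
      else pvA_loop context sentence_tokens rest
    else pvA_loop context sentence_tokens rest

def find_sentence_position_in_context (context : List String) (sentence_tokens : List String) : Option Int :=
  pvA_loop context sentence_tokens (PySem.List.enumerate context)

-- ===== PORT B =====  (Source B: Rabin-Karp with a rolling polynomial hash mod 2^61-1)
def pvMOD : Int := 2305843009213693951
def pvBASE : Int := 1000003

-- '_token_hash(token) = sum(map(ord, token)) % _MOD'
def pvTokenHash (t : String) : Int := ((t.toList.map (fun c => (c.toNat : Int))).sum) % pvMOD

-- 'for start in range(n - m + 1): if h == hp and context[start:start+m] == sentence_tokens: return start; if start+m < n: h = …'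
def pvB_loop (context : List String) (pat : List String) (hp power : Int) : List Int → Int → Option Int
  | [], _ => none
  | start :: rest, h =>
    if h = hp ∧ PySem.List.slice context (some start) (some (start + (pat.length : Int))) = pat
    then some start
    else
      let h' := if start + (pat.length : Int) < (context.length : Int) then
          ((h - pvTokenHash (PySem.List.pyGetD context start "") * power) * pvBASE
            + pvTokenHash (PySem.List.pyGetD context (start + (pat.length : Int)) "")) % pvMOD
        else h
      pvB_loop context pat hp power rest h'

def find_sentence_position_in_context_alt (context : List String) (sentence_tokens : List String) : Option Int :=
  if sentence_tokens.length = 0 ∨ context.length < sentence_tokens.length then none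
  else
    -- 'for i in range(m): hp = (hp*BASE + th(sentence_tokens[i])) % MOD; h = (h*BASE + th(context[i])) % MOD'
    let p := (PySem.List.pyRange 0 (sentence_tokens.length : Int) 1).foldl
      (fun (q : Int × Int) i =>
        ((q.1 * pvBASE + pvTokenHash (PySem.List.pyGetD sentence_tokens i "")) % pvMOD,
         (q.2 * pvBASE + pvTokenHash (PySem.List.pyGetD context i "")) % pvMOD)) (0, 0)
    -- 'power = pow(BASE, m - 1, MOD)'
    let power := PySem.Int.powMod pvBASE (sentence_tokens.length - 1) pvMOD
    pvB_loop context sentence_tokens p.1 power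
      (PySem.List.pyRange 0 ((context.length : Int) - (sentence_tokens.length : Int) + 1) 1) p.2

-- ===== PRECONDITION & SPEC =====
-- Pre_ excludes empty sentence_tokens: there A raises IndexError on sentence_tokens[0] whenever the
-- context is nonempty, and returns None for the empty context only because the loop body never runs;
-- B returns None there (its Rabin-Karp setup needs at least one pattern token).
def Pre_find_sentence_position_in_context (context : List String) (sentence_tokens : List String) : Prop :=
  sentence_tokens ≠ []
instance (context : List String) (sentence_tokens : List String) : Decidable (Pre_find_sentence_position_in_context context sentence_tokens) := by unfold Pre_find_sentence_position_in_context; infer_instance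

def pvWitness_find_sentence_position_in_context : List String × List String := (["a", "b"], ["b"])

def Spec_find_sentence_position_in_context (context : List String) (sentence_tokens : List String) (out : Option Int) : Prop := out = find_sentence_position_in_context_alt context sentence_tokens
instance (context : List String) (sentence_tokens : List String) (out : Option Int) : Decidable (Spec_find_sentence_position_in_context context sentence_tokens out) := by unfold Spec_find_sentence_position_in_context; infer_instance

-- ===== CLAIM (what is proved, stated in full; the proofs are below) =====
def Claim_equal_find_sentence_position_in_context : Prop := ∀ (context : List String) (sentence_tokens : List String), Dom_find_sentence_position_in_context context sentence_tokens → Pre_find_sentence_position_in_context context sentence_tokens → Spec_find_sentence_position_in_context context sentence_tokens (find_sentence_position_in_context context sentence_tokens)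


-- ===== LEMMAS AND PROOFS =====

-- reference: index of the first suffix of which `pat` is a prefix
def pvSpec (pat : List String) : List String → Option Nat
  | [] => none
  | c :: rest => if pat.isPrefixOf (c :: rest) then some 0 else (pvSpec pat rest).map (· + 1)

lemma pvSpec_none_of_short (pat : List String) :
    ∀ l : List String, l.length < pat.length → pvSpec pat l = none := by
  intro l
  induction l with
  | nil => intro _; rfl
  | cons c rest ih =>
    intro h
    simp only [pvSpec]
    rw [if_neg, ih (by simpa using Nat.lt_of_succ_lt h)]
    · rfl
    · intro hp
      have := (List.isPrefixOf_iff_prefix.mp hp).length_le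
      omega

lemma prefix_iff_getElem? (p : List String) :
    ∀ l : List String, (p <+: l ↔ ∀ j, j < p.length → l[j]? = p[j]?) := by
  induction p with
  | nil => intro l; simp
  | cons a p ih =>
    intro l
    cases l with
    | nil =>
      constructor
      · intro h; have := h.length_le; simp at this
      · intro h; have := h 0 (by simp); simp at this
    | cons b l =>
      rw [List.cons_prefix_cons, ih l]
      constructor
      · rintro ⟨rfl, h⟩ j hj
        cases j with
        | zero => simp
        | succ j => simpa using h j (by simpa using hj)
      · intro h
        refine ⟨?_, ?_⟩
        · have := h 0 (by simp); simpa using this.symm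
        · intro j hj; simpa using h (j + 1) (by simpa using hj)

lemma pvA_inner_eq_all (context pat : List String) (ti : Int) :
    ∀ is : List Int, (pvA_inner context pat ti is = true ↔
      ∀ j ∈ is, (context.length : Int) > ti + j ∧
        PySem.List.pyGet? context (ti + j) = PySem.List.pyGet? pat j) := by
  intro is
  induction is with
  | nil => simp [pvA_inner]
  | cons i rest ih =>
    simp only [pvA_inner]
    split_ifs with h
    · simp [ih, h]
    · simp [h]

lemma match_iff (context pat : List String) (hp : pat ≠ []) (c : String) (rest : List String) (k : Nat)
    (hd : List.drop k context = c :: rest) :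
    ((some c = PySem.List.pyGet? pat 0 ∧
        pvA_inner context pat (k : Int) (PySem.List.pyRange 1 (pat.length : Int) 1) = true)
      ↔ pat <+: (c :: rest)) := by
  have hget : ∀ j : Nat, (c :: rest)[j]? = context[k + j]? := by
    intro j
    rw [← hd, List.getElem?_drop]
  have hm0 : 0 < pat.length := List.length_pos_of_ne_nil hp
  rw [prefix_iff_getElem?, pvA_inner_eq_all]
  constructor
  · rintro ⟨h0, hi⟩ j hj
    cases j with
    | zero =>
      have hc : context[k]? = some c := by
        have := hget 0; simpa using this.symm
      rw [hget, Nat.add_zero, hc]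
      simpa [PySem.List.pyGet?_zero] using h0
    | succ j =>
      have hj' : ((j : Int) + 1) ∈ PySem.List.pyRange 1 (pat.length : Int) 1 := by
        rw [PySem.List.mem_pyRange_one]
        constructor <;> [omega; exact_mod_cast hj]
      obtain ⟨-, heq⟩ := hi _ hj'
      have h1 : PySem.List.pyGet? context ((k : Int) + ((j : Int) + 1)) = context[k + (j+1)]? := by
        have : (k : Int) + ((j : Int) + 1) = ((k + (j + 1) : Nat) : Int) := by push_cast; ring
        rw [this, PySem.List.pyGet?_natCast]
      have h2 : PySem.List.pyGet? pat ((j : Int) + 1) = pat[j+1]? := by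
        have : (j : Int) + 1 = ((j + 1 : Nat) : Int) := by push_cast; ring
        rw [this, PySem.List.pyGet?_natCast]
      rw [h1, h2] at heq
      rw [hget]; exact heq
  · intro h
    refine ⟨?_, ?_⟩
    · have h0 := h 0 hm0
      rw [PySem.List.pyGet?_zero]
      simpa using h0
    · intro j hj
      rw [PySem.List.mem_pyRange_one] at hj
      obtain ⟨h1, h2⟩ := hj
      obtain ⟨jn, rfl⟩ : ∃ jn : Nat, j = (jn : Int) := ⟨j.toNat, (Int.toNat_of_nonneg (by omega)).symm⟩
      have hjn : jn < pat.length := by exact_mod_cast h2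
      have heq := h jn hjn
      rw [hget] at heq
      have hk : (k : Int) + (jn : Int) = ((k + jn : Nat) : Int) := by push_cast; ring
      have hsome : context[k + jn]? = some pat[jn] := by
        rw [heq, List.getElem?_eq_getElem hjn]
      constructor
      · have : k + jn < context.length := by
          by_contra hge
          rw [List.getElem?_eq_none (by omega)] at hsome
          simp at hsome
        omega
      · rw [hk, PySem.List.pyGet?_natCast, PySem.List.pyGet?_natCast, heq]

lemma pvA_loop_eq (context pat : List String) (hp : pat ≠ []) :
    ∀ (l : List String) (k : Nat), List.drop k context = l →
      pvA_loop context pat (PySem.List.enumerate l (k : Int)) =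
        (pvSpec pat l).map (fun j => ((k + j : Nat) : Int)) := by
  intro l
  induction l with
  | nil => intro k _; simp [pvA_loop, pvSpec, PySem.List.enumerate_nil]
  | cons c rest ih =>
    intro k hd
    have hrest : List.drop (k + 1) context = rest := by
      rw [← List.drop_drop, hd]; rfl
    rw [PySem.List.enumerate_cons]
    simp only [pvA_loop, pvSpec]
    have hm := match_iff context pat hp c rest k hd
    by_cases hpre : pat <+: (c :: rest)
    · obtain ⟨h0, hi⟩ := hm.mpr hpre
      rw [if_pos h0, if_pos hi, if_pos (List.isPrefixOf_iff_prefix.mpr hpre)]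
      simp
    · have hpb : ¬ (pat.isPrefixOf (c :: rest) = true) := by
        rw [List.isPrefixOf_iff_prefix]; exact hpre
      have hrec : pvA_loop context pat (PySem.List.enumerate rest ((k : Int) + 1)) =
          ((pvSpec pat rest).map (· + 1)).map (fun j => ((k + j : Nat) : Int)) := by
        have := ih (k + 1) hrest
        rw [show ((k : Int) + 1) = ((k + 1 : Nat) : Int) by push_cast; ring, this]
        cases pvSpec pat rest <;> simp <;> push_cast <;> ring
      by_cases h0 : some c = PySem.List.pyGet? pat 0
      · have hinner : ¬ (pvA_inner context pat (k : Int) (PySem.List.pyRange 1 (pat.length : Int) 1) = true) := by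
          intro hi; exact hpre (hm.mp ⟨h0, hi⟩)
        rw [if_pos h0, if_neg hinner, if_neg hpb]
        exact hrec
      · rw [if_neg h0, if_neg hpb]
        exact hrec

-- ---- B-side: the rolling hash is a function of the window, so the hash test is conservative ----

-- the hash fold with the mod folded in, and its exact (mod-free) counterpart
def pvHm (l : List String) : Int := l.foldl (fun h t => (h * pvBASE + pvTokenHash t) % pvMOD) 0
def pvPex (l : List String) (a : Int) : Int := l.foldl (fun h t => h * pvBASE + pvTokenHash t) a

lemma pvMOD_pos : (0 : Int) < pvMOD := by norm_num [pvMOD]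

lemma pv_emod_mul_add (a b c p : Int) : ((a % p) * b + c) % p = (a * b + c) % p := by
  have h : Int.ModEq p (a % p) a := Int.emod_emod_of_dvd a dvd_rfl
  exact (h.mul (Int.ModEq.refl b)).add (Int.ModEq.refl c)

lemma pv_emod_sub_mul_add (x c d b e p : Int) :
    ((x % p - c * (d % p)) * b + e) % p = ((x - c * d) * b + e) % p := by
  have hx : Int.ModEq p (x % p) x := Int.emod_emod_of_dvd x dvd_rfl
  have hd : Int.ModEq p (d % p) d := Int.emod_emod_of_dvd d dvd_rfl
  exact ((hx.sub ((Int.ModEq.refl c).mul hd)).mul (Int.ModEq.refl b)).add (Int.ModEq.refl e)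

lemma pvHm_fold_mod (l : List String) :
    ∀ a : Int, l.foldl (fun h t => (h * pvBASE + pvTokenHash t) % pvMOD) (a % pvMOD)
      = pvPex l a % pvMOD := by
  induction l with
  | nil => intro a; simp [pvPex]
  | cons t l ih =>
    intro a
    simp only [List.foldl_cons, pvPex] at *
    rw [pv_emod_mul_add, ih]

lemma pvHm_eq_pex (l : List String) : pvHm l = pvPex l 0 % pvMOD := by
  have := pvHm_fold_mod l 0
  rwa [Int.zero_emod] at this

lemma pvPex_shift (l : List String) : ∀ a : Int, pvPex l a = a * pvBASE ^ l.length + pvPex l 0 := by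
  induction l with
  | nil => intro a; simp [pvPex]
  | cons t l ih =>
    intro a
    simp only [pvPex, List.foldl_cons] at *
    rw [ih (a * pvBASE + pvTokenHash t), ih (0 * pvBASE + pvTokenHash t)]
    simp only [List.length_cons]
    ring

lemma pvPex_append (l : List String) (u : String) :
    pvPex (l ++ [u]) 0 = pvPex l 0 * pvBASE + pvTokenHash u := by
  simp [pvPex, List.foldl_append]

-- rolling update: the hash of the next window from the hash of the current one
lemma pv_rolling (c u : String) (ws : List String) :
    pvHm (ws ++ [u]) =
      ((pvHm (c :: ws) - pvTokenHash c * (pvBASE ^ ws.length % pvMOD)) * pvBASE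
        + pvTokenHash u) % pvMOD := by
  rw [pvHm_eq_pex, pvHm_eq_pex, pvPex_append, pv_emod_sub_mul_add]
  have hc : pvPex (c :: ws) 0 = pvTokenHash c * pvBASE ^ ws.length + pvPex ws 0 := by
    simp only [pvPex, List.foldl_cons, zero_mul, zero_add]
    have := pvPex_shift ws (pvTokenHash c)
    simpa [pvPex] using this
  rw [hc]
  congr 1
  ring

-- the precompute loop over indices equals the hash of the first m tokens
lemma pvPre_fold (l : List String) (m : Nat) (hm : m ≤ l.length) :
    (PySem.List.pyRange 0 (m : Int) 1).foldl
      (fun h i => (h * pvBASE + pvTokenHash (PySem.List.pyGetD l i "")) % pvMOD) 0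
    = pvHm (l.take m) := by
  have hlen : (l.take m).length = m := by simp [hm]
  rw [show (m : Int) = ((l.take m).length : Int) by rw [hlen]]
  rw [PySem.List.foldl_congr_mem _ _
    (fun h i => (h * pvBASE + pvTokenHash (PySem.List.pyGetD (l.take m) i "")) % pvMOD) _ ?_]
  · exact PySem.List.foldl_pyRange_zero_pyGetD' (l.take m) ""
      (fun h t => (h * pvBASE + pvTokenHash t) % pvMOD) 0
  · intro acc i hi
    rw [PySem.List.mem_pyRange_one] at hi
    obtain ⟨h0, hlt⟩ := hi
    have hi' : i.toNat < m := by omega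
    have hg : PySem.List.pyGetD (l.take m) i "" = PySem.List.pyGetD l i "" := by
      rw [PySem.List.pyGetD_of_nonneg _ _ h0, PySem.List.pyGetD_of_nonneg _ _ h0]
      simp [List.getD_eq_getElem?_getD, hi']
    simp [hg]

lemma pvB_loop_eq (context pat : List String) (hp : pat ≠ []) :
    ∀ (l : List String) (k : Nat) (h : Int), List.drop k context = l →
      (k + pat.length ≤ context.length → h = pvHm ((List.drop k context).take pat.length)) →
      pvB_loop context pat (pvHm pat) (pvBASE ^ (pat.length - 1) % pvMOD)
          (PySem.List.pyRange (k : Int) ((context.length : Int) - (pat.length : Int) + 1) 1) h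
        = (pvSpec pat l).map (fun j => ((k + j : Nat) : Int)) := by
  intro l
  induction l with
  | nil =>
    intro k h hd _
    have hk : context.length ≤ k := by
      by_contra hlt
      push_neg at hlt
      have : (List.drop k context).length = context.length - k := List.length_drop ..
      rw [hd] at this; simp at this; omega
    have hm : 0 < pat.length := List.length_pos_of_ne_nil hp
    rw [PySem.List.pyRange_one_eq_nil (by push_cast; omega)]
    simp [pvB_loop, pvSpec]
  | cons c rest ih =>
    intro k h hd hinv
    have hkn : k < context.length := by
      by_contra hge
      push_neg at hge
      rw [List.drop_eq_nil_of_le hge] at hd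
      simp at hd
    have hrest : List.drop (k + 1) context = rest := by
      rw [← List.drop_drop, hd]; rfl
    have hlrest : rest.length = context.length - (k + 1) := by
      rw [← hrest]; exact List.length_drop ..
    have hm : 0 < pat.length := List.length_pos_of_ne_nil hp
    have hslice : PySem.List.slice context (some (k : Int))
        (some ((k : Int) + (pat.length : Int))) = (List.drop k context).take pat.length :=
      PySem.List.slice_natCast_add ..
    by_cases hfit : (k : Int) < (context.length : Int) - (pat.length : Int) + 1
    · have hkm : k + pat.length ≤ context.length := by
        push_cast at hfit; omega
      have hh : h = pvHm ((c :: rest).take pat.length) := by rw [← hd]; exact hinv hkm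
      rw [PySem.List.pyRange_one_cons hfit]
      simp only [pvB_loop, pvSpec]
      by_cases hpre : pat <+: (c :: rest)
      · have htake : (c :: rest).take pat.length = pat := (List.prefix_iff_eq_take.mp hpre).symm
        rw [if_pos ⟨by rw [hh, htake], by rw [hslice, hd, htake]⟩,
          if_pos (List.isPrefixOf_iff_prefix.mpr hpre)]
        simp
      · have hne : ¬ (h = pvHm pat ∧ PySem.List.slice context (some (k : Int))
            (some ((k : Int) + (pat.length : Int))) = pat) := by
          rintro ⟨-, hs⟩
          rw [hslice, hd] at hs
          exact hpre (List.prefix_iff_eq_take.mpr hs.symm)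
        have hpb : ¬ (pat.isPrefixOf (c :: rest) = true) := by
          rw [List.isPrefixOf_iff_prefix]; exact hpre
        rw [if_neg hne, if_neg hpb]
        -- the updated hash satisfies the invariant at k+1
        have hrec := ih (k + 1)
          (if (k : Int) + (pat.length : Int) < (context.length : Int) then
            ((h - pvTokenHash (PySem.List.pyGetD context (k : Int) "")
                * (pvBASE ^ (pat.length - 1) % pvMOD)) * pvBASE
              + pvTokenHash (PySem.List.pyGetD context ((k : Int) + (pat.length : Int)) ""))
              % pvMOD
           else h) hrest ?_
        · rw [show ((k : Int) + 1) = ((k + 1 : Nat) : Int) by push_cast; ring]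
          rw [hrec]
          cases pvSpec pat rest <;> simp <;> push_cast <;> ring
        · intro hk1m
          have hlt : (k : Int) + (pat.length : Int) < (context.length : Int) := by
            push_cast; omega
          rw [if_pos hlt]
          -- window at k is c :: ws, window at k+1 is ws ++ [u]
          have hwc : (c :: rest).take pat.length
              = c :: rest.take (pat.length - 1) := by
            conv_lhs => rw [show pat.length = (pat.length - 1) + 1 from by omega]
            rw [List.take_succ_cons]
          have hws : (rest.take (pat.length - 1)).length = pat.length - 1 := by
            simp; omega
          have hum : pat.length - 1 < rest.length := by omega
          obtain ⟨u, hu⟩ : ∃ u, rest[pat.length - 1]? = some u :=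
            ⟨_, List.getElem?_eq_getElem hum⟩
          have hwr : rest.take pat.length = rest.take (pat.length - 1) ++ [u] := by
            conv_lhs => rw [show pat.length = (pat.length - 1) + 1 from by omega]
            rw [List.take_succ, hu]
            rfl
          have hgc : PySem.List.pyGetD context (k : Int) "" = c := by
            rw [PySem.List.pyGetD_of_nonneg _ _ (by positivity), Int.toNat_natCast]
            have hc : context[k]? = some c := by
              have h0' : (List.drop k context)[0]? = context[k + 0]? := List.getElem?_drop ..
              rw [hd] at h0'; simpa using h0'.symm
            simp [List.getD_eq_getElem?_getD, hc]
          have hgu : PySem.List.pyGetD context ((k : Int) + (pat.length : Int)) "" = u := by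
            rw [show (k : Int) + (pat.length : Int) = ((k + pat.length : Nat) : Int) by push_cast; ring]
            rw [PySem.List.pyGetD_of_nonneg _ _ (by positivity), Int.toNat_natCast]
            have h1' : (List.drop (k + 1) context)[pat.length - 1]?
                = context[(k + 1) + (pat.length - 1)]? := List.getElem?_drop ..
            rw [hrest, hu] at h1'
            have hc : context[k + pat.length]? = some u := by
              rw [show k + pat.length = (k + 1) + (pat.length - 1) from by omega]
              exact h1'.symm
            simp [List.getD_eq_getElem?_getD, hc]
          rw [hrest, hwr, hgc, hgu]
          rw [hh, hwc]
          rw [pv_rolling c u (rest.take (pat.length - 1)), hws]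
    · push_neg at hfit
      rw [PySem.List.pyRange_one_eq_nil (by omega)]
      have hlen : (c :: rest).length < pat.length := by
        have h1 : (c :: rest).length = context.length - k := by
          rw [← hd, List.length_drop]
        omega
      rw [pvSpec_none_of_short pat _ hlen]
      rfl

-- ===== VERDICT (by name: the statement is the Claim_ definition above) =====
theorem find_sentence_position_in_context_spec : Claim_equal_find_sentence_position_in_context := by
  intro context pat _ hp
  unfold Spec_find_sentence_position_in_context
  unfold find_sentence_position_in_context find_sentence_position_in_context_alt
  have hA : pvA_loop context pat (PySem.List.enumerate context)
      = (pvSpec pat context).map (fun j => ((j : Nat) : Int)) := by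
    have := pvA_loop_eq context pat hp context 0 (by simp)
    simpa using this
  by_cases hlt : context.length < pat.length
  · rw [if_pos (Or.inr hlt), hA, pvSpec_none_of_short pat context hlt]
    rfl
  · push_neg at hlt
    rw [if_neg (by push_neg; exact ⟨List.length_pos_of_ne_nil hp |>.ne', hlt⟩)]
    simp only
    rw [PySem.List.foldl_prod_mk
      (f := fun hq i => (hq * pvBASE + pvTokenHash (PySem.List.pyGetD pat i "")) % pvMOD)
      (g := fun hq i => (hq * pvBASE + pvTokenHash (PySem.List.pyGetD context i "")) % pvMOD)]
    rw [pvPre_fold pat pat.length le_rfl, pvPre_fold context pat.length hlt, List.take_length]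
    rw [PySem.Int.powMod_eq_emod _ _ pvMOD_pos]
    have hB := pvB_loop_eq context pat hp context 0 (pvHm (context.take pat.length))
      (by simp) (by intro _; simp)
    simp only [Nat.cast_zero] at hB
    rw [hB, hA]
    simp
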